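-- pv_equiv track=rewrite | github.com/cmcghan/tulip-rss | misc_testing/tower_of_hanoi2.py | isOpenMove
-- ===== SOURCE A (Python) =====
-- def isAbleToMove(state,pl):
--     # first, find the plate we are moving
--     checkindex = findPlateBySize(state,pl)
--     if (checkindex is None): # if plate doesn't exist, stop (error)
--         return False
--     locA = state[checkindex][1]
--     # make sure nothing is above us (plate must be clear overhead)
--     for i in range(len(state)):
--         if (i != checkindex): # skip plate that is moving
--             plateInfo = state[i]
--             loc = plateInfo[1]
--             if (locA[0] == loc[0]): # if other-plate on same spire-rod
--                 if (locA[1] > loc[1]): # and if lower than other-plate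
--                     return False
--     return True
--
-- def isLocationClear(state,locB):
--     for i in range(len(state)):
--         plateInfo = state[i]
--         loc = plateInfo[1]
--         if (locB == loc): # if other-plate is in location we want to move to
--             return False
--     return True
--
-- def isOpenMove(state,action):
--     """
--     conditions for move to be possible:
--     -- plate at locA has nothing above it
--     -- space at locB is free and nothing free below it and nothing above it
--     """
--     [pl,locA,locB] = action
--     # first, find the plate we are moving
--     checkindex = findPlateBySize(state,pl)
--     if (checkindex is None): # if plate doesn't exist, stop (error)
--         return False
--     # make sure we are at locA to start
--     if (locA != state[checkindex][1]): # if we aren't at required start location, stop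
--         return False
--     # make sure nothing is above us (plate must be clear overhead)
--     if (not isAbleToMove(state,pl)):
--         return False
--     # make sure locB is clear
--     if (not isLocationClear(state,locB)):
--         return False
--     # make sure there is no free space below locB
--     # and
--     # make sure there is no filled space above locB
--     platesBelow = 0
--     for i in range(len(state)):
--         if (i != checkindex): # skip plate that is moving
--             plateInfo = state[i]
--             loc = plateInfo[1]
--             if (locB[0] == loc[0]): # if other-plate on same spire-rod
--                 if (locB[1] < loc[1]): # and if other-plate is lower
--                     platesBelow += 1 # add it to the count
--                 if (locB[1] > loc[1]): # and if other-plate is higher than height-level moving to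
--                    return False # can't move there, stop immediately
--     numPlatesRequiredBelow = len(state)-locB[1] # number of plates - level on spire
--     # e.g., 3 plates and moving to level 3 --> requires 0 plates below
--     #       3 plates and moving to level 1 --> requires 2 plates below
--     if (platesBelow != numPlatesRequiredBelow):
--         return False
--
--     return True
--
-- def findPlateBySize(state,pl):
--     # first, find the plate we are moving
--     checkindex = None
--     for i in range(len(state)):
--         plateInfo = state[i]
--         if (pl == plateInfo[0]):
--             checkindex = i
--             break
--     return checkindex
-- ===== SOURCE B (Python) =====
-- def isOpenMove(state, action):
--     pl, locA, locB = action
--     idx = next((i for i, p in enumerate(state) if p[0] == pl), None)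
--     if idx is None or state[idx][1] != locA or locA == locB:
--         return False
--     below = 0
--     for i, (_, loc) in enumerate(state):
--         if i == idx:
--             continue
--         if loc[0] == locA[0] and loc[1] < locA[1]:
--             return False
--         if loc == locB:
--             return False
--         if loc[0] == locB[0]:
--             if loc[1] > locB[1]:
--                 below += 1
--             elif loc[1] < locB[1]:
--                 return False
--     return below == len(state) - locB[1]
-- ===== Notes on version B (the rewrite author's own statement) =====
-- stated objective: alternative
-- what changed: B replaces A's four separate scans (findPlateBySize inside isAbleToMove, isAbleToMove's overhead scan, isLocationClear's occupancy scan, and the platesBelow counting loop) with the initial find plus one fused pass over the other plates that checks all three rejection conditions and counts platesBelow simultaneously.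
import Mathlib
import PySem

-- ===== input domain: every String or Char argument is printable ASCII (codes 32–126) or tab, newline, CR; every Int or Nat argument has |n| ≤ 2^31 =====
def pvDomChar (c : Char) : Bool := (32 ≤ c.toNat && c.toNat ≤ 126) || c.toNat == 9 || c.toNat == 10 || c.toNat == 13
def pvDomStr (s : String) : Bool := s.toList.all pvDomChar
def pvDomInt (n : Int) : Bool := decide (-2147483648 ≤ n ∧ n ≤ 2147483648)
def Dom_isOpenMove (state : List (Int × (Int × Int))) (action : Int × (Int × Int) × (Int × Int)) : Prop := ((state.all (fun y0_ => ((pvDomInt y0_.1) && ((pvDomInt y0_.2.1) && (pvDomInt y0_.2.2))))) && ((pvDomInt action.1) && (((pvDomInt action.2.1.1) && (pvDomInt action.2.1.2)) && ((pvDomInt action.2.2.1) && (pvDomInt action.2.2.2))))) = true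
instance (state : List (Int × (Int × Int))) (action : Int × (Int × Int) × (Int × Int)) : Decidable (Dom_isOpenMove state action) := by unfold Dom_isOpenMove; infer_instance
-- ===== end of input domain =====

-- B fuses A's four scans (find, isAbleToMove, isLocationClear, the below-count loop)
-- into the initial find plus ONE pass over the other plates: objective 'alternative'.

-- ===== PORT A =====
-- findPlateBySize: loop over indices with break, returning the first matching index (or None)
def findPlateGo (pl : Int) (i : Int) : List (Int × (Int × Int)) → Option Int
  | [] => none
  | p :: rest => if pl == p.1 then some i else findPlateGo pl (i + 1) rest

def findPlateBySize (state : List (Int × (Int × Int))) (pl : Int) : Option Int :=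
  findPlateGo pl 0 state

-- isAbleToMove's loop over enumerate(state) with early return False
def ableGo (checkindex : Int) (locA : Int × Int) : List (Int × (Int × (Int × Int))) → Bool
  | [] => true
  | (i, p) :: rest =>
    if i ≠ checkindex then
      if locA.1 == p.2.1 then
        if locA.2 > p.2.2 then false else ableGo checkindex locA rest
      else ableGo checkindex locA rest
    else ableGo checkindex locA rest

def isAbleToMove (state : List (Int × (Int × Int))) (pl : Int) : Bool :=
  match findPlateBySize state pl with
  | none => false
  | some ci =>
    match PySem.List.pyGet? state ci with
    | none => false  -- unreachable totality guard: the index found is always in range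
    | some p => ableGo ci p.2 (PySem.List.enumerate state)

-- isLocationClear's loop with early return False
def clearGo (locB : Int × Int) : List (Int × (Int × Int)) → Bool
  | [] => true
  | p :: rest => if locB == p.2 then false else clearGo locB rest

def isLocationClear (state : List (Int × (Int × Int))) (locB : Int × Int) : Bool :=
  clearGo locB state

-- the final platesBelow loop: accumulator + early return False (none)
def finalGo (ci : Int) (locB : Int × Int) (below : Int) : List (Int × (Int × (Int × Int))) → Option Int
  | [] => some below
  | (i, p) :: rest =>
    if i ≠ ci then
      if locB.1 == p.2.1 then
        let below' := if locB.2 < p.2.2 then below + 1 else below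
        if locB.2 > p.2.2 then none else finalGo ci locB below' rest
      else finalGo ci locB below rest
    else finalGo ci locB below rest

def isOpenMove (state : List (Int × (Int × Int))) (action : Int × (Int × Int) × (Int × Int)) : Bool :=
  let (pl, locA, locB) := action
  match findPlateBySize state pl with
  | none => false
  | some ci =>
    match PySem.List.pyGet? state ci with
    | none => false  -- unreachable totality guard: the index found is always in range
    | some pc =>
      if locA ≠ pc.2 then false
      else if !(isAbleToMove state pl) then false
      else if !(isLocationClear state locB) then false
      else
        match finalGo ci locB 0 (PySem.List.enumerate state) with
        | none => false
        | some below =>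
          if below ≠ (state.length : Int) - locB.2 then false else true

-- ===== PORT B =====
-- next((i for i, p in enumerate(state) if p[0] == pl), None)
def altFind (pl : Int) : List (Int × (Int × (Int × Int))) → Option Int
  | [] => none
  | (i, p) :: rest => if p.1 == pl then some i else altFind pl rest

-- B's single fused pass: none = early False, some b = platesBelow count b
def fusedGo (idx : Int) (locA locB : Int × Int) (below : Int) :
    List (Int × (Int × (Int × Int))) → Option Int
  | [] => some below
  | (i, p) :: rest =>
    if i == idx then fusedGo idx locA locB below rest
    else if p.2.1 == locA.1 && p.2.2 < locA.2 then none
    else if p.2 == locB then none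
    else if p.2.1 == locB.1 then
      if p.2.2 > locB.2 then fusedGo idx locA locB (below + 1) rest
      else if p.2.2 < locB.2 then none
      else fusedGo idx locA locB below rest
    else fusedGo idx locA locB below rest

def isOpenMove_alt (state : List (Int × (Int × Int))) (action : Int × (Int × Int) × (Int × Int)) : Bool :=
  let (pl, locA, locB) := action
  match altFind pl (PySem.List.enumerate state) with
  | none => false
  | some idx =>
    match PySem.List.pyGet? state idx with
    | none => false  -- unreachable totality guard: idx comes from enumerate(state)
    | some p =>
      if p.2 ≠ locA then false
      else if locA == locB then false
      else
        match fusedGo idx locA locB 0 (PySem.List.enumerate state) with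
        | none => false
        | some below => decide (below = (state.length : Int) - locB.2)

-- ===== PRECONDITION & SPEC =====
def Spec_isOpenMove (state : List (Int × (Int × Int))) (action : Int × (Int × Int) × (Int × Int)) (out : Bool) : Prop := out = isOpenMove_alt state action
instance (state : List (Int × (Int × Int))) (action : Int × (Int × Int) × (Int × Int)) (out : Bool) : Decidable (Spec_isOpenMove state action out) := by unfold Spec_isOpenMove; infer_instance

-- ===== CLAIM (what is proved, stated in full; the proofs are below) =====
def Claim_equal_isOpenMove : Prop := ∀ (state : List (Int × (Int × Int))) (action : Int × (Int × Int) × (Int × Int)), Dom_isOpenMove state action → Spec_isOpenMove state action (isOpenMove state action)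

-- ===== LEMMAS AND PROOFS =====

-- loop characterizations ------------------------------------------------

theorem ableGo_eq (ci : Int) (locA : Int × Int) (l : List (Int × (Int × (Int × Int)))) :
    ableGo ci locA l =
      l.all (fun e => (e.1 == ci) || !((locA.1 == e.2.2.1) && (locA.2 > e.2.2.2))) := by
  induction l with
  | nil => rfl
  | cons e rest ih =>
    obtain ⟨i, p⟩ := e
    simp only [ableGo, List.all_cons]
    split_ifs with h1 h2 h3 <;> simp_all

theorem clearGo_eq (locB : Int × Int) (l : List (Int × (Int × Int))) :
    clearGo locB l = l.all (fun p => !(locB == p.2)) := by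
  induction l with
  | nil => rfl
  | cons p rest ih =>
    simp only [clearGo, List.all_cons]
    split_ifs with h <;> simp_all

theorem finalGo_eq (ci : Int) (locB : Int × Int) (l : List (Int × (Int × (Int × Int)))) :
    ∀ b : Int, finalGo ci locB b l =
      if l.all (fun e => (e.1 == ci) || !((locB.1 == e.2.2.1) && (locB.2 > e.2.2.2))) then
        some (b + (l.countP (fun e => !(e.1 == ci) && ((locB.1 == e.2.2.1) && (locB.2 < e.2.2.2))) : Int))
      else none := by
  induction l with
  | nil => intro b; simp [finalGo]
  | cons e rest ih =>
    intro b
    obtain ⟨i, p⟩ := e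
    simp only [finalGo, List.all_cons, List.countP_cons]
    by_cases h1 : i = ci
    · subst h1
      rw [if_neg (fun h => h rfl), ih]
      simp only [beq_self_eq_true, Bool.true_or, Bool.true_and, Bool.not_true, Bool.false_and]
      simp
    · rw [if_pos h1]
      by_cases h2 : locB.1 = p.2.1
      · by_cases h3 : locB.2 > p.2.2
        · rw [if_pos (by simp [h2]), if_pos h3, if_neg (by simp [h1, h2, h3])]
        · by_cases h4 : locB.2 < p.2.2
          · rw [if_pos (by simp [h2]), if_neg h3]
            simp only [if_pos h4, ih]
            rcases Bool.eq_false_or_eq_true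
                (rest.all fun e => (e.1 == ci) || !((locB.1 == e.2.2.1) && (locB.2 > e.2.2.2))) with
              hall | hall <;> simp only [hall] <;> simp [h1, h2, h3, h4] <;> omega
          · rw [if_pos (by simp [h2]), if_neg h3]
            simp only [if_neg h4, ih]
            rcases Bool.eq_false_or_eq_true
                (rest.all fun e => (e.1 == ci) || !((locB.1 == e.2.2.1) && (locB.2 > e.2.2.2))) with
              hall | hall <;> simp only [hall] <;> simp [h1, h2, h3, h4]
      · rw [if_neg (by simp [h2]), ih]
        rcases Bool.eq_false_or_eq_true
            (rest.all fun e => (e.1 == ci) || !((locB.1 == e.2.2.1) && (locB.2 > e.2.2.2))) with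
          hall | hall <;> simp only [hall] <;> simp [h1, h2]

theorem fusedGo_eq (idx : Int) (locA locB : Int × Int) (l : List (Int × (Int × (Int × Int)))) :
    ∀ b : Int, fusedGo idx locA locB b l =
      if l.all (fun e => (e.1 == idx) ||
          (!((e.2.2.1 == locA.1) && (e.2.2.2 < locA.2)) && !(e.2.2 == locB) &&
            !((e.2.2.1 == locB.1) && (e.2.2.2 < locB.2)))) then
        some (b + (l.countP (fun e => !(e.1 == idx) && ((e.2.2.1 == locB.1) && (e.2.2.2 > locB.2))) : Int))
      else none := by
  induction l with
  | nil => intro b; simp [fusedGo]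
  | cons e rest ih =>
    intro b
    obtain ⟨i, p⟩ := e
    simp only [fusedGo, List.all_cons, List.countP_cons]
    by_cases h1 : i = idx
    · subst h1
      rw [if_pos (by simp), ih]
      simp only [beq_self_eq_true, Bool.true_or, Bool.true_and, Bool.not_true, Bool.false_and]
      simp
    · rw [if_neg (by simp [h1])]
      by_cases h2 : p.2.1 = locA.1 ∧ p.2.2 < locA.2
      · rw [if_pos (by simp [h2.1, h2.2]), if_neg (by simp [h1, h2.1, h2.2])]
      · by_cases h3 : p.2 = locB
        · rw [if_neg (by simp at h2 ⊢; omega), if_pos (by simp [h3]),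
            if_neg (by simp [h1, h3])]
        · by_cases h4 : p.2.1 = locB.1
          · by_cases h5 : p.2.2 > locB.2
            · rw [if_neg (by simp at h2 ⊢; omega), if_neg (by simp [h3]),
                if_pos (by simp [h4]), if_pos (by simp [h5]), ih]
              rcases Bool.eq_false_or_eq_true (rest.all fun e => (e.1 == idx) ||
                  (!((e.2.2.1 == locA.1) && (e.2.2.2 < locA.2)) && !(e.2.2 == locB) &&
                    !((e.2.2.1 == locB.1) && (e.2.2.2 < locB.2)))) with
                hall | hall <;> simp only [hall] <;>
                  simp [h1, h3, h4, h5, fun hh => h2 hh] <;> first | omega | tauto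
            · by_cases h6 : p.2.2 < locB.2
              · rw [if_neg (by simp at h2 ⊢; omega), if_neg (by simp [h3]),
                  if_pos (by simp [h4]), if_neg (by simp; omega), if_pos (by simp [h6]),
                  if_neg (by simp [h1, h4, h6] <;> omega)]
              · rw [if_neg (by simp at h2 ⊢; omega), if_neg (by simp [h3]),
                  if_pos (by simp [h4]), if_neg (by simp; omega), if_neg (by simp; omega), ih]
                rcases Bool.eq_false_or_eq_true (rest.all fun e => (e.1 == idx) ||
                    (!((e.2.2.1 == locA.1) && (e.2.2.2 < locA.2)) && !(e.2.2 == locB) &&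
                      !((e.2.2.1 == locB.1) && (e.2.2.2 < locB.2)))) with
                  hall | hall <;> simp only [hall] <;>
                    simp [h1, h3, h4, h5, h6, fun hh => h2 hh] <;> first | omega | tauto
          · rw [if_neg (by simp at h2 ⊢; omega), if_neg (by simp [h3]),
              if_neg (by simp [h4]), ih]
            rcases Bool.eq_false_or_eq_true (rest.all fun e => (e.1 == idx) ||
                (!((e.2.2.1 == locA.1) && (e.2.2.2 < locA.2)) && !(e.2.2 == locB) &&
                  !((e.2.2.1 == locB.1) && (e.2.2.2 < locB.2)))) with
              hall | hall <;> simp only [hall] <;>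
                simp [h1, h3, h4, fun hh => h2 hh] <;> first | omega | tauto

-- the two finders agree ---------------------------------------------------

theorem find_eq (pl : Int) (l : List (Int × (Int × Int))) :
    ∀ i : Int, findPlateGo pl i l = altFind pl (PySem.List.enumerate l i) := by
  induction l with
  | nil => intro i; rfl
  | cons p rest ih =>
    intro i
    rw [PySem.List.enumerate_cons]
    simp only [findPlateGo, altFind]
    by_cases h : pl = p.1
    · simp [h]
    · simp [h, Ne.symm h, ih]

theorem altFind_sound (pl ci : Int) :
    ∀ (l : List (Int × (Int × (Int × Int)))), altFind pl l = some ci → ∃ e ∈ l, e.1 = ci := by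
  intro l
  induction l with
  | nil => intro h; simp [altFind] at h
  | cons e rest ih =>
    intro h
    obtain ⟨i, p⟩ := e
    simp only [altFind] at h
    split_ifs at h with h1
    · exact ⟨(i, p), by simp, by simpa using h⟩
    · obtain ⟨e', he', hc⟩ := ih h
      exact ⟨e', by simp [he'], hc⟩

-- main -------------------------------------------------------------------

-- pointwise Bool/Prop bridges for the scan predicates ---------------------

theorem A_elem_iff (ci : Int) (locA : Int × Int) (e : Int × (Int × (Int × Int))) :
    (((e.1 == ci) || !((locA.1 == e.2.2.1) && (locA.2 > e.2.2.2))) = true) ↔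
      (e.1 = ci ∨ ¬(locA.1 = e.2.2.1 ∧ locA.2 > e.2.2.2)) := by
  by_cases h1 : e.1 = ci <;> by_cases h2 : locA.1 = e.2.2.1 <;>
    by_cases h3 : locA.2 > e.2.2.2 <;> simp [h1, h2, h3]

theorem G_elem_iff (ci : Int) (locA locB : Int × Int) (e : Int × (Int × (Int × Int))) :
    (((e.1 == ci) || (!((e.2.2.1 == locA.1) && (e.2.2.2 < locA.2)) && !(e.2.2 == locB) &&
        !((e.2.2.1 == locB.1) && (e.2.2.2 < locB.2)))) = true) ↔
      (e.1 = ci ∨ (¬(e.2.2.1 = locA.1 ∧ e.2.2.2 < locA.2) ∧ ¬(e.2.2 = locB) ∧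
        ¬(e.2.2.1 = locB.1 ∧ e.2.2.2 < locB.2))) := by
  by_cases h1 : e.1 = ci <;> by_cases h2 : e.2.2.1 = locA.1 <;>
    by_cases h3 : e.2.2.2 < locA.2 <;> by_cases h4 : e.2.2 = locB <;>
      by_cases h5 : e.2.2.1 = locB.1 <;> by_cases h6 : e.2.2.2 < locB.2 <;>
        simp [h1, h2, h3, h4, h5, h6]

theorem cnt_fun_eq (ci : Int) (locB : Int × Int) (e : Int × (Int × (Int × Int))) :
    (!(e.1 == ci) && ((locB.1 == e.2.2.1) && (locB.2 < e.2.2.2))) =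
      (!(e.1 == ci) && ((e.2.2.1 == locB.1) && (e.2.2.2 > locB.2))) := by
  by_cases hx : locB.1 = e.2.2.1
  · simp [hx]
  · have hx' : ¬ e.2.2.1 = locB.1 := fun hh => hx hh.symm
    rw [show (locB.1 == e.2.2.1) = false from by simp [hx],
      show (e.2.2.1 == locB.1) = false from by simp [hx']]

theorem ite_ne_decide (c N : Int) : (if c ≠ N then false else true) = decide (c = N) := by
  by_cases h : c = N <;> simp [h]

theorem clear_all_iff (locB : Int × Int) (l : List (Int × (Int × Int))) :
    ((l.all fun p => !(locB == p.2)) = true) ↔ (∀ p ∈ l, ¬(locB = p.2)) := by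
  simp

theorem main_eq (state : List (Int × (Int × Int))) (pl : Int) (locA locB : Int × Int) :
    isOpenMove state (pl, locA, locB) = isOpenMove_alt state (pl, locA, locB) := by
  simp only [isOpenMove, isOpenMove_alt, isAbleToMove, isLocationClear, findPlateBySize]
  rw [find_eq]
  cases hfind : altFind pl (PySem.List.enumerate state 0) with
  | none => rfl
  | some ci =>
    obtain ⟨e, heE, heci⟩ := altFind_sound pl ci _ hfind
    rw [PySem.List.mem_enumerate_iff] at heE
    obtain ⟨k, hk, hek⟩ := heE
    have hcik : ci = (k : Int) := by rw [← heci, hek]; simp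
    have hget : PySem.List.pyGet? state ci = some state[k] := by
      rw [hcik, PySem.List.pyGet?_natCast, List.getElem?_eq_getElem hk]
    simp only [hget]
    set pc := state[k] with hpc
    by_cases hloc : locA = pc.2
    case neg =>
      rw [if_pos (show locA ≠ pc.2 from hloc),
        if_pos (show pc.2 ≠ locA from fun h => hloc h.symm)]
    case pos =>
    rw [if_neg (show ¬(locA ≠ pc.2) from by simp [hloc]),
      if_neg (show ¬(pc.2 ≠ locA) from by simp [hloc]), ← hloc]
    simp only [ableGo_eq, clearGo_eq, finalGo_eq, fusedGo_eq]
    have hci_uniq : ∀ e ∈ PySem.List.enumerate state 0, e.1 = ci → e.2 = pc := by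
      intro e he hec
      rw [PySem.List.mem_enumerate_iff] at he
      obtain ⟨j, hj, hej⟩ := he
      have hjk : (j : Int) = (k : Int) := by
        have h := hec
        rw [hej] at h
        simpa [hcik] using h
      have hjk' : j = k := by exact_mod_cast hjk
      subst hjk'
      rw [hej]
    by_cases hAB : locA = locB
    · -- the moving plate itself occupies locB: A's isLocationClear fails, B's guard fails
      have hCf : (state.all fun p => !(locB == p.2)) = false := by
        rcases Bool.eq_false_or_eq_true (state.all fun p => !(locB == p.2)) with hb | hb
        · exact absurd (hAB.symm.trans hloc)
            ((clear_all_iff locB state).mp hb pc (hpc ▸ List.getElem_mem hk))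
        · exact hb
      rcases Bool.eq_false_or_eq_true ((PySem.List.enumerate state 0).all fun e =>
          (e.1 == ci) || !((locA.1 == e.2.2.1) && (locA.2 > e.2.2.2))) with h | h <;>
        simp only [h, hCf] <;> simp [hAB]
    · rw [if_neg (show ¬((locA == locB) = true) from by simp [hAB])]
      -- Prop views of the four scans
      have hAiff : (((PySem.List.enumerate state 0).all fun e =>
          (e.1 == ci) || !((locA.1 == e.2.2.1) && (locA.2 > e.2.2.2))) = true) ↔
          (∀ e ∈ PySem.List.enumerate state 0,
            e.1 = ci ∨ ¬(locA.1 = e.2.2.1 ∧ locA.2 > e.2.2.2)) := by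
        rw [List.all_eq_true]
        exact ⟨fun h e he => (A_elem_iff ci locA e).mp (h e he),
          fun h e he => (A_elem_iff ci locA e).mpr (h e he)⟩
      have hFiff : (((PySem.List.enumerate state 0).all fun e =>
          (e.1 == ci) || !((locB.1 == e.2.2.1) && (locB.2 > e.2.2.2))) = true) ↔
          (∀ e ∈ PySem.List.enumerate state 0,
            e.1 = ci ∨ ¬(locB.1 = e.2.2.1 ∧ locB.2 > e.2.2.2)) := by
        rw [List.all_eq_true]
        exact ⟨fun h e he => (A_elem_iff ci locB e).mp (h e he),
          fun h e he => (A_elem_iff ci locB e).mpr (h e he)⟩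
      have hGiff : (((PySem.List.enumerate state 0).all fun e => (e.1 == ci) ||
          (!((e.2.2.1 == locA.1) && (e.2.2.2 < locA.2)) && !(e.2.2 == locB) &&
            !((e.2.2.1 == locB.1) && (e.2.2.2 < locB.2)))) = true) ↔
          (∀ e ∈ PySem.List.enumerate state 0,
            e.1 = ci ∨ (¬(e.2.2.1 = locA.1 ∧ e.2.2.2 < locA.2) ∧ ¬(e.2.2 = locB) ∧
              ¬(e.2.2.1 = locB.1 ∧ e.2.2.2 < locB.2))) := by
        rw [List.all_eq_true]
        exact ⟨fun h e he => (G_elem_iff ci locA locB e).mp (h e he),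
          fun h e he => (G_elem_iff ci locA locB e).mpr (h e he)⟩
      -- the heart: A's three remaining scans together are exactly B's fused scan
      have key : ((∀ e ∈ PySem.List.enumerate state 0,
            e.1 = ci ∨ ¬(locA.1 = e.2.2.1 ∧ locA.2 > e.2.2.2)) ∧
          (∀ p ∈ state, ¬(locB = p.2)) ∧
          (∀ e ∈ PySem.List.enumerate state 0,
            e.1 = ci ∨ ¬(locB.1 = e.2.2.1 ∧ locB.2 > e.2.2.2))) ↔
          (∀ e ∈ PySem.List.enumerate state 0,
            e.1 = ci ∨ (¬(e.2.2.1 = locA.1 ∧ e.2.2.2 < locA.2) ∧ ¬(e.2.2 = locB) ∧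
              ¬(e.2.2.1 = locB.1 ∧ e.2.2.2 < locB.2))) := by
        constructor
        · rintro ⟨hA, hC, hF⟩ e he
          by_cases hec : e.1 = ci
          · exact Or.inl hec
          · have hA' := (hA e he).resolve_left hec
            have hF' := (hF e he).resolve_left hec
            have hmem : e.2 ∈ state := by
              rw [PySem.List.mem_enumerate_iff] at he
              obtain ⟨j, hj, hej⟩ := he
              rw [hej]
              exact List.getElem_mem hj
            exact Or.inr ⟨fun hh => hA' ⟨hh.1.symm, hh.2⟩,
              fun hh => hC e.2 hmem hh.symm,
              fun hh => hF' ⟨hh.1.symm, hh.2⟩⟩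
        · intro hG
          refine ⟨fun e he => ?_, fun p hp => ?_, fun e he => ?_⟩
          · by_cases hec : e.1 = ci
            · exact Or.inl hec
            · exact Or.inr fun hh => ((hG e he).resolve_left hec).1 ⟨hh.1.symm, hh.2⟩
          · obtain ⟨j, hj, hpj⟩ := List.mem_iff_getElem.mp hp
            have hjE : ((j : Int), p) ∈ PySem.List.enumerate state 0 := by
              rw [PySem.List.mem_enumerate_iff]
              exact ⟨j, hj, by simp [hpj]⟩
            by_cases hec : ((j : Int)) = ci
            · have h2 := hci_uniq _ hjE hec
              simp only at h2
              intro hh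
              rw [h2] at hh
              exact hAB (hloc.trans hh.symm)
            · intro hh
              exact ((hG _ hjE).resolve_left hec).2.1 hh.symm
          · by_cases hec : e.1 = ci
            · exact Or.inl hec
            · exact Or.inr fun hh => ((hG e he).resolve_left hec).2.2 ⟨hh.1.symm, hh.2⟩
      by_cases hG : ∀ e ∈ PySem.List.enumerate state 0,
          e.1 = ci ∨ (¬(e.2.2.1 = locA.1 ∧ e.2.2.2 < locA.2) ∧ ¬(e.2.2 = locB) ∧
            ¬(e.2.2.1 = locB.1 ∧ e.2.2.2 < locB.2))
      · -- everything passes on both sides; the two counts agree pointwise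
        obtain ⟨h1, h2, h3⟩ := key.mpr hG
        have hAb := hAiff.mpr h1
        have hCb := (clear_all_iff locB state).mpr h2
        have hFb := hFiff.mpr h3
        have hGb := hGiff.mpr hG
        have hcnt : (PySem.List.enumerate state 0).countP
              (fun e => !(e.1 == ci) && ((locB.1 == e.2.2.1) && (locB.2 < e.2.2.2)))
            = (PySem.List.enumerate state 0).countP
              (fun e => !(e.1 == ci) && ((e.2.2.1 == locB.1) && (e.2.2.2 > locB.2))) := by
          exact List.countP_congr fun e _ => by rw [cnt_fun_eq ci locB e]
        simp only [hAb, hCb, hFb, hGb, hcnt, Bool.not_true]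
        rw [if_neg (show ¬(false = true) from Bool.false_ne_true),
          if_neg (show ¬(false = true) from Bool.false_ne_true)]
        exact ite_ne_decide _ _
      · -- B's fused scan rejects; so does one of A's three scans
        have hGb : ((PySem.List.enumerate state 0).all fun e => (e.1 == ci) ||
            (!((e.2.2.1 == locA.1) && (e.2.2.2 < locA.2)) && !(e.2.2 == locB) &&
              !((e.2.2.1 == locB.1) && (e.2.2.2 < locB.2)))) = false := by
          rcases Bool.eq_false_or_eq_true ((PySem.List.enumerate state 0).all fun e =>
              (e.1 == ci) || (!((e.2.2.1 == locA.1) && (e.2.2.2 < locA.2)) && !(e.2.2 == locB) &&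
                !((e.2.2.1 == locB.1) && (e.2.2.2 < locB.2)))) with hb | hb
          · exact absurd (hGiff.mp hb) hG
          · exact hb
        have hnot : ¬ ((∀ e ∈ PySem.List.enumerate state 0,
              e.1 = ci ∨ ¬(locA.1 = e.2.2.1 ∧ locA.2 > e.2.2.2)) ∧
            (∀ p ∈ state, ¬(locB = p.2)) ∧
            (∀ e ∈ PySem.List.enumerate state 0,
              e.1 = ci ∨ ¬(locB.1 = e.2.2.1 ∧ locB.2 > e.2.2.2))) :=
          fun hh => hG (key.mp hh)
        have hone : (((PySem.List.enumerate state 0).all fun e =>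
              (e.1 == ci) || !((locA.1 == e.2.2.1) && (locA.2 > e.2.2.2))) = false) ∨
            ((state.all fun p => !(locB == p.2)) = false) ∨
            (((PySem.List.enumerate state 0).all fun e =>
              (e.1 == ci) || !((locB.1 == e.2.2.1) && (locB.2 > e.2.2.2))) = false) := by
          by_contra hcon
          push_neg at hcon
          obtain ⟨h1', h2', h3'⟩ := hcon
          simp only [ne_eq, Bool.not_eq_false] at h1' h2' h3'
          exact hnot ⟨hAiff.mp h1', (clear_all_iff locB state).mp h2', hFiff.mp h3'⟩
        rcases hone with h | h | h
        · simp only [h, hGb]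
          simp
        · rcases Bool.eq_false_or_eq_true ((PySem.List.enumerate state 0).all fun e =>
              (e.1 == ci) || !((locA.1 == e.2.2.1) && (locA.2 > e.2.2.2))) with h' | h' <;>
            simp only [h', h, hGb] <;> simp
        · rcases Bool.eq_false_or_eq_true ((PySem.List.enumerate state 0).all fun e =>
              (e.1 == ci) || !((locA.1 == e.2.2.1) && (locA.2 > e.2.2.2))) with h' | h' <;>
            rcases Bool.eq_false_or_eq_true (state.all fun p => !(locB == p.2)) with h'' | h'' <;>
              simp only [h', h'', h, hGb] <;> simp

-- ===== VERDICT (by name: the statement is the Claim_ definition above) =====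
theorem isOpenMove_spec : Claim_equal_isOpenMove := by
  intro state action _
  obtain ⟨pl, locA, locB⟩ := action
  exact main_eq state pl locA locB
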